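-- pv_equiv track=rewrite | github.com/anikchand461/llmsays | src/llmsays/__init__.py | _provider_order
-- ===== SOURCE A (Python) =====
-- from typing import Dict, Iterable, List, Optional, Tuple
--
-- def _provider_order(provider_preference: Optional[Iterable[str]] = None) -> List[str]:
--     default_order = ["Groq", "NIM", "Openrouter", "Fireworks", "Baseten"]
--     if not provider_preference:
--         return default_order
--
--     order: List[str] = []
--     for name in provider_preference:
--         for canonical in default_order:
--             if canonical.lower() == str(name).strip().lower() and canonical not in order:
--                 order.append(canonical)
--                 break
--     return order or default_order
-- ===== SOURCE B (Python) =====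
-- from typing import Dict, Iterable, List, Optional, Tuple
--
-- def _provider_order(provider_preference: Optional[Iterable[str]] = None) -> List[str]:
--     default_order = ["Groq", "NIM", "Openrouter", "Fireworks", "Baseten"]
--     if not provider_preference:
--         return default_order
--
--     keys = [str(name).strip().lower() for name in provider_preference]
--     hits = [(keys.index(c.lower()), c) for c in default_order if c.lower() in keys]
--     hits.sort(key=lambda t: t[0])
--     return [c for _, c in hits] or default_order
-- ===== Notes on version B (the rewrite author's own statement) =====
-- stated objective: faster
-- what changed: Replaces A's single incremental pass (for each name, nested scan of the canonical list with a 'not already taken' membership test) by staged passes: normalize all names once in a comprehension, then for each canonical look up its first-occurrence index with list.index, sort the hits by index and extract the canonicals.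
import Mathlib
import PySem

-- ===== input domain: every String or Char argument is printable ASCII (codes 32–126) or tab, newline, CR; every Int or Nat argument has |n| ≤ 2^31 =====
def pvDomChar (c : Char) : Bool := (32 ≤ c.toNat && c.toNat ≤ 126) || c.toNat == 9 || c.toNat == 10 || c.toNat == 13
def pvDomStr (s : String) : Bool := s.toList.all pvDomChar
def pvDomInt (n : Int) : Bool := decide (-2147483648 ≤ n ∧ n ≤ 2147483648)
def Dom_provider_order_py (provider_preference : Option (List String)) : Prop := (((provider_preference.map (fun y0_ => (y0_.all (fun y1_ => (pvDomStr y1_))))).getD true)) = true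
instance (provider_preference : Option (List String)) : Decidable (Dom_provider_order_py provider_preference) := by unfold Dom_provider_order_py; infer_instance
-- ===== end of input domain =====

-- B replaces A's incremental nested-scan accumulation by staged passes: normalize all
-- names once, look up each canonical's first-occurrence index, sort the hits by index
-- (alternative decomposition; same return value everywhere).


-- ===== PORT A =====
def pvDefaults : List String := ["Groq", "NIM", "Openrouter", "Fireworks", "Baseten"]

-- A's inner `for canonical in default_order: … break` loop
def pvInnerA : List String → List String → String → List String
  | [], order, _ => order
  | c :: rest, order, key =>
      if PySem.Str.lower c == key && !(order.contains c) then order ++ [c]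
      else pvInnerA rest order key

def provider_order_py (provider_preference : Option (List String)) : List String :=
  match provider_preference with
  | none => pvDefaults
  | some names =>
      if names = [] then pvDefaults
      else
        let order := names.foldl
          (fun order name => pvInnerA pvDefaults order (PySem.Str.lower (PySem.Str.strip name))) []
        if order = [] then pvDefaults else order

-- ===== PORT B =====
def provider_order_py_alt (provider_preference : Option (List String)) : List String :=
  match provider_preference with
  | none => pvDefaults
  | some names =>
      if names = [] then pvDefaults
      else
        -- keys = [str(name).strip().lower() for name in provider_preference]
        let keys := names.map (fun name => PySem.Str.lower (PySem.Str.strip name))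
        -- hits = [(keys.index(c.lower()), c) for c in default_order if c.lower() in keys]
        let hits := (pvDefaults.filter (fun c => keys.contains (PySem.Str.lower c))).map
          (fun c => ((PySem.List.index? keys (PySem.Str.lower c)).getD 0, c))
        -- hits.sort(key=lambda t: t[0])
        let hits := PySem.List.sorted hits (fun t => t.1) false
        -- [c for _, c in hits] or default_order
        let res := hits.map (fun t => t.2)
        if res = [] then pvDefaults else res

-- ===== PRECONDITION & SPEC =====
def Spec_provider_order_py (provider_preference : Option (List String)) (out : List String) : Prop := out = provider_order_py_alt provider_preference
instance (provider_preference : Option (List String)) (out : List String) : Decidable (Spec_provider_order_py provider_preference out) := by unfold Spec_provider_order_py; infer_instance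

-- ===== CLAIM (what is proved, stated in full; the proofs are below) =====
def Claim_equal_provider_order_py : Prop := ∀ (provider_preference : Option (List String)), Dom_provider_order_py provider_preference → Spec_provider_order_py provider_preference (provider_order_py provider_preference)

-- ===== LEMMAS AND PROOFS =====

-- A's outer loop over the (already normalized) keys
def pvAorder (keys : List String) : List String :=
  keys.foldl (fun order key => pvInnerA pvDefaults order key) []

-- A's inner loop = find the first canonical (lower = key) not yet taken, append it
theorem pvInnerFind (ds order : List String) (key : String) :
    pvInnerA ds order key =
      match (ds.filter (fun c => !(order.contains c))).find?
          (fun c => PySem.Str.lower c == key) with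
      | some c => order ++ [c]
      | none => order := by
  induction ds with
  | nil => rfl
  | cons c rest ih =>
      simp only [pvInnerA, List.filter_cons]
      by_cases hc : c ∈ order <;>
      by_cases hk : PySem.Str.lower c = key <;>
        simp [hc, hk, ih]

-- invariant of A's outer loop: the accumulator holds exactly the canonicals whose
-- lowercase form occurs among the keys, in strictly increasing first-occurrence order
theorem pvInv (keys : List String) :
    (∀ c, c ∈ pvAorder keys ↔ (c ∈ pvDefaults ∧ PySem.Str.lower c ∈ keys)) ∧
    (pvAorder keys).Pairwise (fun a b =>
      (PySem.List.index? keys (PySem.Str.lower a)).getD 0 <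
      (PySem.List.index? keys (PySem.Str.lower b)).getD 0) := by
  induction keys using List.reverseRecOn with
  | nil => simp [pvAorder]
  | append_singleton keys k ih =>
      obtain ⟨hmem, hpw⟩ := ih
      have hfold : pvAorder (keys ++ [k]) = pvInnerA pvDefaults (pvAorder keys) k := by
        simp [pvAorder, List.foldl_append]
      have inj : ∀ c ∈ pvDefaults, ∀ c' ∈ pvDefaults,
          PySem.Str.lower c = PySem.Str.lower c' → c = c' := by decide
      rw [hfold, pvInnerFind]
      cases hf : (pvDefaults.filter (fun c => !((pvAorder keys).contains c))).find?
          (fun c => PySem.Str.lower c == k) with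
      | none =>
          have hno : ∀ c ∈ pvDefaults, PySem.Str.lower c = k → c ∈ pvAorder keys := by
            intro c hcd hck
            by_contra hcn
            have : ¬ (PySem.Str.lower c == k) = true := by
              refine List.find?_eq_none.mp hf c ?_
              simp [List.mem_filter, hcd, hcn]
            simp [hck] at this
          constructor
          · intro c
            rw [hmem c]
            constructor
            · rintro ⟨h1, h2⟩; exact ⟨h1, by simp [h2]⟩
            · rintro ⟨h1, h2⟩
              rcases (by simpa using h2 : PySem.Str.lower c ∈ keys ∨ PySem.Str.lower c = k) with h | h
              · exact ⟨h1, h⟩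
              · exact ⟨h1, ((hmem c).mp (hno c h1 h)).2⟩
          · refine hpw.imp_of_mem ?_
            intro a b ha hb hlt
            have hax := ((hmem a).mp ha).2
            have hbx := ((hmem b).mp hb).2
            rwa [PySem.List.index?_append_of_mem _ hax, PySem.List.index?_append_of_mem _ hbx]
      | some c₀ =>
          have hc₀ := List.mem_filter.mp (List.mem_of_find?_eq_some hf)
          have hc₀d : c₀ ∈ pvDefaults := hc₀.1
          have hc₀n : c₀ ∉ pvAorder keys := by simpa using hc₀.2
          have hkey : PySem.Str.lower c₀ = k := by
            have := List.find?_some hf; simpa using this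
          have hknot : k ∉ keys := by
            intro hk
            exact hc₀n ((hmem c₀).mpr ⟨hc₀d, hkey ▸ hk⟩)
          constructor
          · intro c
            simp only [List.mem_append, List.mem_singleton, hmem c]
            constructor
            · rintro (⟨h1, h2⟩ | rfl)
              · exact ⟨h1, by simp [h2]⟩
              · exact ⟨hc₀d, by simp [hkey]⟩
            · rintro ⟨h1, h2⟩
              rcases (by simpa using h2 : PySem.Str.lower c ∈ keys ∨ PySem.Str.lower c = k) with h | h
              · exact Or.inl ⟨h1, h⟩
              · exact Or.inr (inj c h1 c₀ hc₀d (h.trans hkey.symm))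
          · rw [List.pairwise_append]
            refine ⟨?_, by simp, ?_⟩
            · refine hpw.imp_of_mem ?_
              intro a b ha hb hlt
              have hax := ((hmem a).mp ha).2
              have hbx := ((hmem b).mp hb).2
              rwa [PySem.List.index?_append_of_mem _ hax, PySem.List.index?_append_of_mem _ hbx]
            · intro a ha b hb
              simp only [List.mem_singleton] at hb
              subst hb
              have hax := ((hmem a).mp ha).2
              rw [PySem.List.index?_append_of_mem _ hax, hkey,
                  PySem.List.index?_append_singleton_self _ _ hknot]
              obtain ⟨j, hj⟩ := Option.isSome_iff_exists.mp
                ((PySem.List.index?_isSome_iff keys (PySem.Str.lower a)).mpr hax)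
              obtain ⟨hjl, -⟩ := PySem.List.getElem_of_index?_eq_some hj
              rw [PySem.List.index?_eq_idxOf?] at hj
              simp [hj]
              exact hjl

-- Nodup of A's accumulator (from strict ordering of first-occurrence indices)
theorem pvAorderNodup (keys : List String) : (pvAorder keys).Nodup := by
  refine (pvInv keys).2.imp ?_
  intro a b hlt heq
  subst heq
  exact absurd hlt (lt_irrefl _)

-- sorting B's hits by position reproduces A's accumulation order
theorem pvMain (keys : List String) :
    PySem.List.sorted
      ((pvDefaults.filter (fun c => keys.contains (PySem.Str.lower c))).map
        (fun c => ((PySem.List.index? keys (PySem.Str.lower c)).getD 0, c)))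
      (fun t => t.1) false
    = (pvAorder keys).map
        (fun c => ((PySem.List.index? keys (PySem.Str.lower c)).getD 0, c)) := by
  apply PySem.List.sorted_eq_of_perm_of_pairwise_lt
  · refine List.Perm.map _ ?_
    refine (List.perm_ext_iff_of_nodup (pvAorderNodup keys) ?_).mpr ?_
    · exact List.Nodup.filter _ (by decide)
    · intro c
      rw [(pvInv keys).1 c]
      simp [List.mem_filter]
  · rw [List.pairwise_map]
    exact (pvInv keys).2

-- ===== VERDICT (by name: the statement is the Claim_ definition above) =====
theorem provider_order_py_spec : Claim_equal_provider_order_py := by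
  intro pref _
  unfold Spec_provider_order_py provider_order_py provider_order_py_alt
  match pref with
  | none => rfl
  | some names =>
      by_cases h : names = []
      · simp [h]
      · simp only [h, if_false]
        have hfold : names.foldl
            (fun order name => pvInnerA pvDefaults order (PySem.Str.lower (PySem.Str.strip name))) []
            = pvAorder (names.map (fun name => PySem.Str.lower (PySem.Str.strip name))) := by
          rw [pvAorder, List.foldl_map]
        rw [hfold, pvMain]
        simp [Function.comp_def]
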